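-- pv_equiv track=rewrite | github.com/mpodhaisky/aoc_2023 | day14.py | part1
-- ===== SOURCE A (Python) =====
-- def part1(data):
--     grid = data.strip().split("\n")
--     new_grid = []
--     t = 0
--     for line in zip(*grid):
--         line = "".join(line)
--         groups = line.split("#")
--         new_grid.append("#".join(["".join(sorted(group)[::-1]) for group in groups]))
--     for i, l in enumerate(list(zip(*new_grid))[::-1], 1):
--         t += l.count("O") * i
--     return t
-- ===== SOURCE B (Python) =====
-- def part1(data):
--     grid = data.strip().split("\n")
--     R = len(grid)
--     total = 0
--     for col in zip(*grid):
--         start = 0   # index where the current '#'-free group begins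
--         gt = 0      # chars in the group sorting above 'O'
--         o = 0       # 'O' rocks in the group
--         for i, c in enumerate(col):
--             if c == '#':
--                 top = start + gt
--                 total += o * (R - top) - o * (o - 1) // 2
--                 start, gt, o = i + 1, 0, 0
--             elif c == 'O':
--                 o += 1
--             elif c > 'O':
--                 gt += 1
--         top = start + gt
--         total += o * (R - top) - o * (o - 1) // 2
--     return total
-- ===== Notes on version B (the rewrite author's own statement) =====
-- stated objective: faster
-- what changed: B never builds the tilted grid: instead of sorting every '#'-separated group of each column and re-transposing to weigh rows, it makes one pass over each column keeping counts (group start, chars sorting above 'O', 'O' count) and adds each group's load in closed form.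
import Mathlib
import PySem

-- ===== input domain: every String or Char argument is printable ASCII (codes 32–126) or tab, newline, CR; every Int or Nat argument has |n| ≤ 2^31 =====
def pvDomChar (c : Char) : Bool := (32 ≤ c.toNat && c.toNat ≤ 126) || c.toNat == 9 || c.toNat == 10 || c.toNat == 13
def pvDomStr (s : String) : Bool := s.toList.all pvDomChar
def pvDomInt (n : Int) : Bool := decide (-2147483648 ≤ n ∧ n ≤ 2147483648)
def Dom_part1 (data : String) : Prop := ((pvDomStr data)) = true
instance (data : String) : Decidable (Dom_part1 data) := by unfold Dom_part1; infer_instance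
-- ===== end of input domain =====

-- B re-implements part1 without building the tilted grid: one pass per column with
-- running counts, adding each rock group's load in closed form (same value, no sort,
-- no second transpose).

-- ===== PORT A =====
-- zip(*rows): Python's zip over the rows — yields one tuple while every row is nonempty (exact for zip(*grid))
def pyzip (ls : List (List Char)) : List (List Char) :=
  if h : ls ≠ [] ∧ ls.all (fun l => !l.isEmpty) then
    ls.map (fun l => l.headD ' ') :: pyzip (ls.map List.tail)
  else []
termination_by (ls.headD []).length
decreasing_by
  obtain ⟨h1, h2⟩ := h
  cases ls with
  | nil => exact absurd rfl h1
  | cons a t =>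
    simp only [List.all_cons, Bool.and_eq_true, Bool.not_eq_true'] at h2
    simp only [List.headD_cons]
    cases a with
    | nil => simp at h2
    | cons x xs => simp

-- literal port of A; sorted(group)[::-1] is ported as sorted-then-reverse (a full step -1 slice IS the reverse)
def part1 (data : String) : Int :=
  let grid : List (List Char) := PySem.Chars.splitOn (PySem.Chars.strip data.toList) ['\n']
  let newGrid : List (List Char) :=
    (pyzip grid).foldl (fun acc line =>
      acc ++ [PySem.Chars.join ['#'] ((PySem.Chars.splitOn line ['#']).map
        (fun group => (PySem.List.sorted group (fun c => c) false).reverse))]) []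
  (PySem.List.enumerate ((pyzip newGrid).reverse) 1).foldl
    (fun t p => t + (p.2.count 'O' : Int) * p.1) 0

-- ===== PORT B =====
-- literal port of Source B: single pass over each column, state (start, gt, o, total)
def part1_alt (data : String) : Int :=
  let grid : List (List Char) := PySem.Chars.splitOn (PySem.Chars.strip data.toList) ['\n']
  let R : Int := grid.length
  (pyzip grid).foldl (fun total col =>
    let s := (PySem.List.enumerate col 0).foldl
      (fun (s : Int × Int × Int × Int) (p : Int × Char) =>
        if p.2 = '#' then
          (p.1 + 1, 0, 0, s.2.2.2 + (s.2.2.1 * (R - (s.1 + s.2.1)) -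
            PySem.Int.floordiv (s.2.2.1 * (s.2.2.1 - 1)) 2))
        else if p.2 = 'O' then (s.1, s.2.1, s.2.2.1 + 1, s.2.2.2)
        else if 'O' < p.2 then (s.1, s.2.1 + 1, s.2.2.1, s.2.2.2)
        else s)
      (0, 0, 0, total)
    s.2.2.2 + (s.2.2.1 * (R - (s.1 + s.2.1)) -
      PySem.Int.floordiv (s.2.2.1 * (s.2.2.1 - 1)) 2)) 0

-- ===== PRECONDITION & SPEC =====
def Spec_part1 (data : String) (out : Int) : Prop := out = part1_alt data
instance (data : String) (out : Int) : Decidable (Spec_part1 data out) := by unfold Spec_part1; infer_instance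

-- ===== CLAIM (what is proved, stated in full; the proofs are below) =====
def Claim_equal_part1 : Prop := ∀ (data : String), Dom_part1 data → Spec_part1 data (part1 data)

-- ===== LEMMAS AND PROOFS =====

-- the value Python's line.split('#') computes, in structural form
def mySplit (pre : List Char) : List Char → List (List Char)
  | [] => [pre]
  | c :: cs => if c = '#' then pre :: mySplit [] cs else mySplit (pre ++ [c]) cs

lemma go_eq (fuel : ℕ) : ∀ (l cur : List Char) (acc : List (List Char)), l.length ≤ fuel →
    PySem.Chars.splitOn.go ['#'] fuel l cur acc = acc.reverse ++ mySplit cur.reverse l := by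
  induction fuel with
  | zero =>
    intro l cur acc h
    have : l = [] := List.eq_nil_of_length_eq_zero (Nat.le_zero.mp h)
    subst this
    simp [PySem.Chars.splitOn.go, mySplit]
  | succ n ih =>
    intro l cur acc h
    cases l with
    | nil => simp [PySem.Chars.splitOn.go, mySplit]
    | cons c rest =>
      by_cases hc : c = '#'
      · subst hc
        rw [PySem.Chars.splitOn.go]
        simp only [List.isPrefixOf, BEq.rfl, Bool.true_and, if_pos, List.length_cons,
          List.length_nil, List.drop_succ_cons, List.drop_zero]
        rw [ih rest [] (cur.reverse :: acc) (by simpa using Nat.le_of_succ_le_succ h)]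
        simp [mySplit]
      · rw [PySem.Chars.splitOn.go]
        have hpre : (['#'] : List Char).isPrefixOf (c :: rest) = false := by
          simp [List.isPrefixOf]; exact fun hh => hc hh.symm
        rw [hpre]
        simp only [Bool.false_eq_true, if_false]
        rw [ih rest (c :: cur) acc (by simpa using Nat.le_of_succ_le_succ h)]
        simp [mySplit, hc]

lemma splitOn_hash (l : List Char) : PySem.Chars.splitOn l ['#'] = mySplit [] l := by
  rw [PySem.Chars.splitOn, go_eq _ _ _ _ (by omega)]; rfl

lemma mySplit_ne_nil (pre : List Char) (col : List Char) : mySplit pre col ≠ [] := by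
  cases col with
  | nil => simp [mySplit]
  | cons c cs => by_cases hc : c = '#' <;> simp [mySplit, hc] <;> exact mySplit_ne_nil _ _

-- sorted(g)[::-1]
def srev (g : List Char) : List Char := (PySem.List.sorted g (fun c => c) false).reverse

lemma length_srev (g : List Char) : (srev g).length = g.length := by
  simp [srev, (PySem.List.sorted_perm g (fun c => c) false).length_eq]

-- load of a column segment starting at absolute row s, in a grid of RI rows
def loadL (RI : Int) (s : Int) : List Char → Int
  | [] => 0
  | c :: v => (if c = 'O' then RI - s else 0) + loadL RI (s + 1) v

def flushv (RI start gt o : Int) : Int :=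
  o * (RI - (start + gt)) - PySem.Int.floordiv (o * (o - 1)) 2

-- spec of B's inner loop (mirrors the state machine; flush included at the end)
def Binner (RI : Int) (i start gt o : Int) : List Char → Int
  | [] => flushv RI start gt o
  | c :: cs =>
    if c = '#' then flushv RI start gt o + Binner RI (i+1) (i+1) 0 0 cs
    else if c = 'O' then Binner RI (i+1) start gt (o+1) cs
    else if 'O' < c then Binner RI (i+1) start (gt+1) o cs
    else Binner RI (i+1) start gt o cs

lemma loadL_append (RI : Int) (u v : List Char) : ∀ s : Int,
    loadL RI s (u ++ v) = loadL RI s u + loadL RI (s + u.length) v := by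
  induction u with
  | nil => intro s; simp [loadL]
  | cons c t ih =>
    intro s
    simp only [List.cons_append, loadL, ih (s+1), List.length_cons]
    push_cast
    have h : s + 1 + (t.length : Int) = s + ((t.length : Int) + 1) := by ring
    rw [h]
    ring

lemma loadL_noO (RI : Int) (u : List Char) (h : ∀ c ∈ u, c ≠ 'O') : ∀ s, loadL RI s u = 0 := by
  induction u with
  | nil => intro s; simp [loadL]
  | cons c t ih =>
    intro s
    have hc : c ≠ 'O' := h c (by simp)
    simp [loadL, hc, ih (fun x hx => h x (by simp [hx]))]

lemma fd_two_step (k : Int) : PySem.Int.floordiv ((k + 1) * k) 2 = PySem.Int.floordiv (k * (k - 1)) 2 + k := by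
  have : (k + 1) * k = k * (k - 1) + k * 2 := by ring
  rw [this, PySem.Int.floordiv, PySem.Int.floordiv, Int.add_mul_fdiv_right _ _ (by norm_num)]

lemma loadL_replicate (RI : Int) (o : ℕ) : ∀ top : Int,
    loadL RI top (List.replicate o 'O') =
      (o : Int) * (RI - top) - PySem.Int.floordiv ((o : Int) * ((o : Int) - 1)) 2 := by
  induction o with
  | zero => intro top; simp [loadL, PySem.Int.floordiv]
  | succ n ih =>
    intro top
    have h2 := fd_two_step (n : Int)
    simp only [List.replicate_succ, loadL, if_pos rfl, ih (top + 1)]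
    push_cast
    have h3 : ((n : Int) + 1 - 1) = (n : Int) := by ring
    rw [h3, h2]
    ring

-- a descending list splits into the part above 'O', the 'O's, and the part below
lemma desc_decomp (l : List Char) (h : l.Pairwise (fun a b => b ≤ a)) :
    l = l.filter (fun c => decide ('O' < c)) ++ l.filter (fun c => c == 'O')
        ++ l.filter (fun c => decide (c < 'O')) := by
  induction l with
  | nil => simp
  | cons c t ih =>
    have hpw := (List.pairwise_cons.mp h).2
    have hall := (List.pairwise_cons.mp h).1
    have ht := ih hpw
    rcases lt_trichotomy 'O' c with hlt | heq | hgt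
    · have h1 : (decide ('O' < c)) = true := decide_eq_true hlt
      have h2 : (c == 'O') = false := by simp; exact ne_of_gt hlt
      have h3 : (decide (c < 'O')) = false := decide_eq_false (not_lt.mpr (le_of_lt hlt))
      simp only [List.filter_cons, h1, h2, h3, if_true, Bool.false_eq_true, if_false]
      exact congrArg (c :: ·) ht
    · subst heq
      have hno : t.filter (fun c => decide ('O' < c)) = [] :=
        List.filter_eq_nil_iff.mpr (fun a ha => by simpa using not_lt.mpr (hall a ha))
      rw [hno] at ht
      have h1 : (decide ('O' < 'O')) = false := by decide
      have h2 : ('O' == 'O') = true := by decide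
      have h3 : (decide ('O' < 'O')) = false := by decide
      simp only [List.filter_cons, h1, h2, h3, if_true, Bool.false_eq_true, if_false, hno,
        List.nil_append]
      exact congrArg ('O' :: ·) (by simpa using ht)
    · have h1 : (decide ('O' < c)) = false := decide_eq_false (not_lt.mpr (le_of_lt hgt))
      have h2 : (c == 'O') = false := by simp; exact ne_of_lt hgt
      have h3 : (decide (c < 'O')) = true := decide_eq_true hgt
      have hnog : t.filter (fun c => decide ('O' < c)) = [] :=
        List.filter_eq_nil_iff.mpr (fun a ha => by
          simpa using not_lt.mpr (le_trans (hall a ha) (le_of_lt hgt)))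
      have hnoe : t.filter (fun c => c == 'O') = [] :=
        List.filter_eq_nil_iff.mpr (fun a ha => by
          simpa using ne_of_lt (lt_of_le_of_lt (hall a ha) hgt))
      rw [hnog, hnoe] at ht
      simp only [List.filter_cons, h1, h2, h3, if_true, Bool.false_eq_true, if_false, hnog,
        hnoe, List.nil_append]
      exact congrArg (c :: ·) (by simpa using ht)

lemma loadL_srev (RI : Int) (g : List Char) (s : Int) :
    loadL RI s (srev g) =
      flushv RI s ((g.countP (fun c => decide ('O' < c)) : Int)) ((g.count 'O' : Int)) := by
  have hperm : (srev g).Perm g :=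
    ((PySem.List.sorted_perm g (fun c => c) false).symm.trans (List.reverse_perm _).symm).symm
  have hdesc : (srev g).Pairwise (fun a b : Char => b ≤ a) := by
    rw [srev, List.pairwise_reverse]
    exact PySem.List.sorted_pairwise g (fun c => c)
  have hdec := desc_decomp (srev g) hdesc
  have hrep : (srev g).filter (fun c => c == 'O') = List.replicate ((srev g).count 'O') 'O' :=
    List.filter_beq 'O'
  have hcount : (srev g).count 'O' = g.count 'O' := hperm.count_eq 'O'
  have hcountP : (srev g).countP (fun c => decide ('O' < c)) = g.countP (fun c => decide ('O' < c)) :=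
    hperm.countP_eq _
  set P := (srev g).filter (fun c => decide ('O' < c)) with hP
  set S := (srev g).filter (fun c => decide (c < 'O')) with hS
  have hPlen : P.length = g.countP (fun c => decide ('O' < c)) := by
    rw [hP, ← List.countP_eq_length_filter]; exact hcountP
  calc loadL RI s (srev g) = loadL RI s (P ++ ((srev g).filter (fun c => c == 'O') ++ S)) := by
        rw [← List.append_assoc, ← hdec]
    _ = _ := by
        rw [loadL_append, loadL_append]
        have hPno : loadL RI s P = 0 := by
          apply loadL_noO
          intro c hc
          have := List.of_mem_filter hc
          simp only [decide_eq_true_eq] at this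
          exact fun e => absurd (e ▸ this) (lt_irrefl _)
        have hSno : loadL RI (s + P.length + ((srev g).filter (fun c => c == 'O')).length) S = 0 := by
          apply loadL_noO
          intro c hc
          have := List.of_mem_filter hc
          simp only [decide_eq_true_eq] at this
          exact fun e => absurd (e ▸ this) (lt_irrefl _)
        rw [hPno, hSno, hrep, hcount, loadL_replicate]
        simp only [flushv, hPlen]
        push_cast
        ring

-- the per-column agreement: B's state machine computes the load of A's tilted column
lemma K (RI : Int) : ∀ (col : List Char) (i s : Int) (pre : List Char),
    (∀ c ∈ pre, c ≠ '#') → i = s + pre.length →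
    Binner RI i s ((pre.countP (fun c => decide ('O' < c)) : Int)) ((pre.count 'O' : Int)) col
      = loadL RI s (PySem.Chars.join ['#'] ((mySplit pre col).map srev)) := by
  intro col
  induction col with
  | nil =>
    intro i s pre hpre hi
    simp only [mySplit, List.map_cons, List.map_nil, PySem.Chars.join_singleton, Binner]
    exact (loadL_srev RI pre s).symm
  | cons c cs ih =>
    intro i s pre hpre hi
    by_cases hc : c = '#'
    · subst hc
      simp only [mySplit, Binner, reduceIte, List.map_cons]
      rcases hsh : (mySplit ([] : List Char) cs).map srev with _ | ⟨b, t⟩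
      · exact absurd (List.map_eq_nil_iff.mp hsh) (mySplit_ne_nil _ _)
      · rw [PySem.Chars.join_cons_cons, List.append_assoc, loadL_append, length_srev,
          loadL_srev]
        have hJ : loadL RI (s + (pre.length : Int)) (['#'] ++ PySem.Chars.join ['#'] (b :: t))
            = loadL RI (s + (pre.length : Int) + 1) (PySem.Chars.join ['#'] (b :: t)) := by
          simp [loadL]
        rw [hJ, ← hsh]
        have hIH := ih (i + 1) (i + 1) [] (by simp) (by simp)
        simp only [List.countP_nil, List.count_nil, Nat.cast_zero] at hIH
        rw [hi] at hIH ⊢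
        rw [hIH]
    · by_cases hO : c = 'O'
      · subst hO
        simp only [mySplit, Binner, if_neg hc, reduceIte]
        have hIH := ih (i + 1) s (pre ++ ['O'])
          (by intro x hx
              rcases List.mem_append.mp hx with h | h
              · exact hpre x h
              · simp at h; subst h; decide)
          (by subst hi
              simp only [List.length_append, List.length_singleton]
              push_cast; ring)
        have hcP : (pre ++ ['O']).countP (fun c => decide ('O' < c)) =
            pre.countP (fun c => decide ('O' < c)) := by
          simp [List.countP_append]
        have hcO : ((pre ++ ['O']).count 'O' : Int) = (pre.count 'O' : Int) + 1 := by
          simp [List.count_append]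
        rw [hcP, hcO] at hIH
        exact hIH
      · by_cases hgt : 'O' < c
        · simp only [mySplit, Binner, if_neg hc, if_neg hO, if_pos hgt]
          have hIH := ih (i + 1) s (pre ++ [c])
            (by intro x hx
                rcases List.mem_append.mp hx with h | h
                · exact hpre x h
                · simp at h; subst h; exact hc)
            (by subst hi
                simp only [List.length_append, List.length_singleton]
                push_cast; ring)
          have hcP : ((pre ++ [c]).countP (fun c => decide ('O' < c)) : Int) =
              (pre.countP (fun c => decide ('O' < c)) : Int) + 1 := by
            simp [List.countP_append, hgt]
          have hcO : (pre ++ [c]).count 'O' = pre.count 'O' := by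
            simp [List.count_append, hO]
          rw [hcP, hcO] at hIH
          exact hIH
        · simp only [mySplit, Binner, if_neg hc, if_neg hO, if_neg hgt]
          have hIH := ih (i + 1) s (pre ++ [c])
            (by intro x hx
                rcases List.mem_append.mp hx with h | h
                · exact hpre x h
                · simp at h; subst h; exact hc)
            (by subst hi
                simp only [List.length_append, List.length_singleton]
                push_cast; ring)
          have hcP : (pre ++ [c]).countP (fun c => decide ('O' < c)) =
              pre.countP (fun c => decide ('O' < c)) := by
            simp [List.countP_append, hgt]
          have hcO : (pre ++ [c]).count 'O' = pre.count 'O' := by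
            simp [List.count_append, hO]
          rw [hcP, hcO] at hIH
          exact hIH

-- length of a tilted column = original length
lemma lenTilt : ∀ (col pre : List Char),
    (PySem.Chars.join ['#'] ((mySplit pre col).map srev)).length = pre.length + col.length := by
  intro col
  induction col with
  | nil =>
    intro pre
    simp [mySplit, PySem.Chars.join_singleton, length_srev]
  | cons c cs ih =>
    intro pre
    by_cases hc : c = '#'
    · subst hc
      simp only [mySplit, reduceIte, List.map_cons]
      rcases hsh : (mySplit ([] : List Char) cs).map srev with _ | ⟨b, t⟩
      · exact absurd (List.map_eq_nil_iff.mp hsh) (mySplit_ne_nil _ _)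
      · rw [PySem.Chars.join_cons_cons]
        have hl := ih []
        rw [hsh] at hl
        simp only [List.length_nil, Nat.zero_add] at hl
        simp only [List.length_append, length_srev, hl, List.length_cons, List.length_nil]
        omega
    · simp only [mySplit, if_neg hc]
      rw [ih (pre ++ [c])]
      simp only [List.length_append, List.length_cons, List.length_nil]
      omega

lemma pyzip_nil : pyzip [] = [] := by rw [pyzip]; simp

lemma length_of_mem_pyzip_aux : ∀ (n : ℕ) (ls : List (List Char)), (ls.headD []).length ≤ n →
    ∀ c ∈ pyzip ls, c.length = ls.length := by
  intro n
  induction n with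
  | zero =>
    intro ls hn c hc
    rw [pyzip] at hc
    split at hc
    · rename_i h
      obtain ⟨h1, h2⟩ := h
      rcases ls with _ | ⟨a, t⟩
      · exact absurd rfl h1
      · simp only [List.all_cons, Bool.and_eq_true, Bool.not_eq_true'] at h2
        rcases a with _ | ⟨x, xs⟩
        · simp at h2
        · simp at hn
    · simp at hc
  | succ n ih =>
    intro ls hn c hc
    rw [pyzip] at hc
    split at hc
    · rename_i h
      obtain ⟨h1, h2⟩ := h
      rcases List.mem_cons.mp hc with h3 | h3
      · subst h3; simp
      · have hhd : ((ls.map List.tail).headD []).length ≤ n := by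
          rcases ls with _ | ⟨a, t⟩
          · exact absurd rfl h1
          · simp only [List.map_cons, List.headD_cons] at *
            rcases a with _ | ⟨x, xs⟩
            · simp
            · simp at hn ⊢; omega
        have := ih (ls.map List.tail) hhd c h3
        simpa using this
    · simp at hc

lemma length_of_mem_pyzip (ls : List (List Char)) (c : List Char) (hc : c ∈ pyzip ls) :
    c.length = ls.length :=
  length_of_mem_pyzip_aux (ls.headD []).length ls le_rfl c hc

lemma pyzip_transpose (n : ℕ) : ∀ (ls : List (List Char)), ls ≠ [] → (∀ l ∈ ls, l.length = n) →
    pyzip ls = (List.range n).map (fun j => ls.map (fun r => r.getD j ' ')) := by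
  induction n with
  | zero =>
    intro ls hne hlen
    rw [pyzip, dif_neg, List.range_zero, List.map_nil]
    rintro ⟨h1, h2⟩
    rcases ls with _ | ⟨a, t⟩
    · exact hne rfl
    · have := hlen a (by simp)
      have ha : a = [] := List.eq_nil_of_length_eq_zero this
      simp [ha] at h2
  | succ n ih =>
    intro ls hne hlen
    have hall : ls.all (fun l => !l.isEmpty) = true := by
      rw [List.all_eq_true]
      intro l hl
      have := hlen l hl
      cases l
      · simp at this
      · simp
    rw [pyzip, dif_pos ⟨hne, hall⟩]
    have htl : ∀ l ∈ ls.map List.tail, l.length = n := by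
      intro l hl
      rcases List.mem_map.mp hl with ⟨a, ha, rfl⟩
      have := hlen a ha
      cases a
      · simp at this
      · simpa using this
    have hmtne : ls.map List.tail ≠ [] := by
      cases ls
      · exact absurd rfl hne
      · simp
    rw [ih (ls.map List.tail) hmtne htl]
    rw [List.range_succ_eq_map, List.map_cons, List.map_map]
    congr 1
    · apply List.map_congr_left
      intro a ha
      have := hlen a ha
      cases a
      · simp at this
      · simp
    · apply List.map_congr_left
      intro j hj
      simp only [Function.comp, List.map_map]
      apply List.map_congr_left
      intro a ha
      cases a
      · simp
      · simp

-- sum of the weighted row counts, reading the transposed grid back-to-front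
lemma SR (f : ℕ → List Char) : ∀ (n : ℕ) (m : Int),
    ((PySem.List.enumerate ((List.range n).reverse.map f) m).map
        (fun p => (p.2.count 'O' : Int) * p.1)).sum
      = ∑ j ∈ Finset.range n, ((f j).count 'O' : Int) * (m + n - 1 - j) := by
  intro n
  induction n with
  | zero => intro m; simp [PySem.List.enumerate]
  | succ n ih =>
    intro m
    rw [List.range_succ, List.reverse_append, List.reverse_singleton]
    simp only [List.singleton_append, List.map_cons, PySem.List.enumerate_cons, List.map_cons,
      List.sum_cons, ih (m + 1), Finset.sum_range_succ]
    push_cast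
    have hcong : ∀ j ∈ Finset.range n,
        ((f j).count 'O' : Int) * (m + 1 + (n : Int) - 1 - j)
          = ((f j).count 'O' : Int) * (m + ((n : Int) + 1) - 1 - j) := by
      intro j hj; ring
    rw [Finset.sum_congr rfl hcong]
    ring

lemma CNT (j : ℕ) (w : Int) : ∀ (L : List (List Char)),
    ((L.map (fun r => r.getD j ' ')).count 'O' : Int) * w
      = (L.map (fun c => if c.getD j ' ' = 'O' then w else 0)).sum := by
  intro L
  induction L with
  | nil => simp
  | cons r L ih =>
    simp only [List.map_cons, List.sum_cons, ← ih, List.count_cons]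
    by_cases h : r.getD j ' ' = 'O'
    · simp only [h, BEq.rfl, if_pos]
      push_cast
      ring
    · have hne2 : (r.getD j ' ' == 'O') = false := beq_eq_false_iff_ne.mpr h
      simp only [hne2, if_neg h, Bool.false_eq_true, if_false]
      push_cast
      ring

lemma SWAP (h : List Char → ℕ → Int) : ∀ (L : List (List Char)) (n : ℕ),
    ∑ j ∈ Finset.range n, (L.map (fun c => h c j)).sum
      = (L.map (fun c => ∑ j ∈ Finset.range n, h c j)).sum := by
  intro L
  induction L with
  | nil => simp
  | cons c L ih =>
    intro n
    simp only [List.map_cons, List.sum_cons, Finset.sum_add_distrib, ih n]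

lemma LOADIDX (RI : Int) : ∀ (c : List Char) (s : Int),
    loadL RI s c = ∑ j ∈ Finset.range c.length, (if c.getD j ' ' = 'O' then RI - (s + j) else 0) := by
  intro c
  induction c with
  | nil => intro s; simp [loadL]
  | cons x v ih =>
    intro s
    rw [List.length_cons, Finset.sum_range_succ']
    simp only [List.getD_cons_succ, List.getD_cons_zero, Nat.cast_zero, add_zero]
    have hcong : ∀ j ∈ Finset.range v.length,
        (if v.getD j ' ' = 'O' then RI - (s + ((j : ℕ) + 1 : ℕ)) else 0)
          = (if v.getD j ' ' = 'O' then RI - ((s + 1) + (j : ℕ)) else 0) := by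
      intro j hj
      by_cases h : v.getD j ' ' = 'O'
      · simp only [if_pos h]
        push_cast
        ring
      · simp only [if_neg h]
    rw [Finset.sum_congr rfl hcong, ← ih (s + 1)]
    simp only [loadL]
    ring

-- B's inner fold, finalized, computes Binner
def finz (RI : Int) (r : Int × Int × Int × Int) : Int :=
  r.2.2.2 + (r.2.2.1 * (RI - (r.1 + r.2.1)) - PySem.Int.floordiv (r.2.2.1 * (r.2.2.1 - 1)) 2)

lemma FOLDB (RI : Int) : ∀ (col : List Char) (i start gt o t : Int),
    finz RI ((PySem.List.enumerate col i).foldl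
        (fun (s : Int × Int × Int × Int) (p : Int × Char) =>
          if p.2 = '#' then
            (p.1 + 1, 0, 0, s.2.2.2 + (s.2.2.1 * (RI - (s.1 + s.2.1)) -
              PySem.Int.floordiv (s.2.2.1 * (s.2.2.1 - 1)) 2))
          else if p.2 = 'O' then (s.1, s.2.1, s.2.2.1 + 1, s.2.2.2)
          else if 'O' < p.2 then (s.1, s.2.1 + 1, s.2.2.1, s.2.2.2)
          else s)
        (start, gt, o, t))
      = t + Binner RI i start gt o col := by
  intro col
  induction col with
  | nil =>
    intro i start gt o t
    simp [PySem.List.enumerate, Binner, flushv, finz]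
  | cons c cs ih =>
    intro i start gt o t
    rw [PySem.List.enumerate_cons, List.foldl_cons]
    by_cases hc : c = '#'
    · subst hc
      simp only [reduceIte, Binner]
      rw [ih]
      simp only [flushv]
      ring
    · by_cases hO : c = 'O'
      · subst hO
        simp only [if_neg hc, reduceIte, Binner]
        rw [ih]
      · by_cases hgt : 'O' < c
        · simp only [if_neg hc, if_neg hO, if_pos hgt, Binner]
          rw [ih]
        · simp only [if_neg hc, if_neg hO, if_neg hgt, Binner]
          rw [ih]

lemma srev_eq : (fun group => (PySem.List.sorted group (fun c : Char => c) false).reverse) = srev := rfl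

lemma MAIN (grid : List (List Char)) :
    (PySem.List.enumerate ((pyzip ((pyzip grid).foldl (fun acc line =>
        acc ++ [PySem.Chars.join ['#'] ((PySem.Chars.splitOn line ['#']).map
          (fun group => (PySem.List.sorted group (fun c => c) false).reverse))]) [])).reverse) 1).foldl
      (fun t p => t + (p.2.count 'O' : Int) * p.1) 0
    = (pyzip grid).foldl (fun total col =>
        let s := (PySem.List.enumerate col 0).foldl
          (fun (s : Int × Int × Int × Int) (p : Int × Char) =>
            if p.2 = '#' then
              (p.1 + 1, 0, 0, s.2.2.2 + (s.2.2.1 * (((grid.length : Int)) - (s.1 + s.2.1)) -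
                PySem.Int.floordiv (s.2.2.1 * (s.2.2.1 - 1)) 2))
            else if p.2 = 'O' then (s.1, s.2.1, s.2.2.1 + 1, s.2.2.2)
            else if 'O' < p.2 then (s.1, s.2.1 + 1, s.2.2.1, s.2.2.2)
            else s)
          (0, 0, 0, total)
        s.2.2.2 + (s.2.2.1 * (((grid.length : Int)) - (s.1 + s.2.1)) -
          PySem.Int.floordiv (s.2.2.1 * (s.2.2.1 - 1)) 2)) 0 := by
  -- name the tilting map and the columns
  rw [PySem.List.foldl_append_singleton_eq_map, List.nil_append]
  set RI : Int := (grid.length : Int) with hRI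
  set tiltA : List Char → List Char := fun line =>
    PySem.Chars.join ['#'] ((PySem.Chars.splitOn line ['#']).map
      (fun group => (PySem.List.sorted group (fun c => c) false).reverse)) with htilt
  set cols := pyzip grid with hcols
  -- B side: the inner loop is Binner, the outer loop a sum
  have hB : cols.foldl (fun total col =>
      let s := (PySem.List.enumerate col 0).foldl
        (fun (s : Int × Int × Int × Int) (p : Int × Char) =>
          if p.2 = '#' then
            (p.1 + 1, 0, 0, s.2.2.2 + (s.2.2.1 * (RI - (s.1 + s.2.1)) -
              PySem.Int.floordiv (s.2.2.1 * (s.2.2.1 - 1)) 2))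
          else if p.2 = 'O' then (s.1, s.2.1, s.2.2.1 + 1, s.2.2.2)
          else if 'O' < p.2 then (s.1, s.2.1 + 1, s.2.2.1, s.2.2.2)
          else s)
        (0, 0, 0, total)
      s.2.2.2 + (s.2.2.1 * (RI - (s.1 + s.2.1)) -
        PySem.Int.floordiv (s.2.2.1 * (s.2.2.1 - 1)) 2)) 0
      = (cols.map (fun col => Binner RI 0 0 0 0 col)).sum := by
    rw [PySem.List.foldl_congr_mem _ _ (fun total col => total + Binner RI 0 0 0 0 col) 0
      (by intro acc x _; exact FOLDB RI x 0 0 0 0 acc)]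
    rw [PySem.List.foldl_add]
    simp
  rw [hB]
  -- tilted columns agree with Binner
  have htcol : ∀ col ∈ cols, loadL RI 0 (tiltA col) = Binner RI 0 0 0 0 col := by
    intro col _
    rw [htilt]
    simp only [srev_eq, splitOn_hash]
    exact (K RI col 0 0 [] (by simp) (by simp)).symm
  by_cases hc : cols = []
  · rw [hc]
    simp [pyzip_nil, PySem.List.enumerate]
  · -- A side: transpose, weights, sum exchange
    have hlen : ∀ l ∈ cols.map tiltA, l.length = grid.length := by
      intro l hl
      rcases List.mem_map.mp hl with ⟨col, hcol, rfl⟩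
      have h1 : (tiltA col).length = col.length := by
        rw [htilt]
        simp only [srev_eq, splitOn_hash]
        rw [lenTilt]
        simp
      rw [h1]
      exact length_of_mem_pyzip grid col (hcols ▸ hcol)
    have hne : cols.map tiltA ≠ [] := by
      simp only [ne_eq, List.map_eq_nil_iff]
      exact hc
    rw [pyzip_transpose grid.length (cols.map tiltA) hne hlen]
    rw [← List.map_reverse]
    rw [PySem.List.foldl_add, SR]
    have hstep1 : ∀ j ∈ Finset.range grid.length,
        ((((cols.map tiltA).map (fun r => r.getD j ' ')).count 'O' : Int)) * (1 + (grid.length : Int) - 1 - j)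
          = ((cols.map tiltA).map (fun c => if c.getD j ' ' = 'O' then RI - j else 0)).sum := by
      intro j hj
      rw [← CNT j (RI - j)]
      rw [hRI]
      ring
    rw [Finset.sum_congr rfl hstep1, SWAP]
    have hstep2 : ∀ c ∈ cols.map tiltA,
        (∑ k ∈ Finset.range grid.length, (fun j => if c.getD j ' ' = 'O' then RI - (j : ℕ) else 0) k)
          = loadL RI 0 c := by
      intro c hcm
      rw [LOADIDX RI c 0, hlen c hcm]
      apply Finset.sum_congr rfl
      intro j hj
      by_cases h : c.getD j ' ' = 'O'
      · simp only [if_pos h]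
        ring
      · simp only [if_neg h]
    rw [List.map_congr_left hstep2]
    rw [List.map_map]
    rw [show (loadL RI 0 ∘ tiltA) = (fun col => loadL RI 0 (tiltA col)) from rfl]
    rw [List.map_congr_left (fun col hcol => htcol col hcol)]
    simp

-- ===== VERDICT (by name: the statement is the Claim_ definition above) =====
theorem part1_spec : Claim_equal_part1 := by
  intro data _
  unfold Spec_part1 part1 part1_alt
  exact MAIN (PySem.Chars.splitOn (PySem.Chars.strip data.toList) ['\n'])
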